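-- pv_equiv track=rewrite | github.com/Harryalerta/CantStop | DontStop/modulos/calculadorProbabilidade.py | proximo_da_combinacao
-- ===== SOURCE A (Python) =====
-- def proximo_da_combinacao(sequencia: list) -> list:
--     if sequencia[0] == sequencia[-1]:
--         if sequencia[0] != 6:
--             sequencia[0] += 1
--             for i in range(1,len(sequencia)):
--                 sequencia[i] = 1
--     else:
--         sequencia[1:len(sequencia)] = proximo_da_combinacao(sequencia[1:len(sequencia)])
--
--     return sequencia
-- ===== SOURCE B (Python) =====
-- def proximo_da_combinacao(sequencia: list) -> list:
--     last = sequencia[-1]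
--     k = 0
--     while sequencia[k] != last:
--         k += 1
--     if sequencia[k] != 6:
--         sequencia[k] += 1
--         sequencia[k + 1:] = [1] * (len(sequencia) - k - 1)
--     return sequencia
-- ===== Notes on version B (the rewrite author's own statement) =====
-- stated objective: faster
-- what changed: Replaces A's recursive descent with per-level slice copies by a single iterative scan for the first index equal to the last element, followed by one in-place increment and one slice assignment of 1s.
import Mathlib
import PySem

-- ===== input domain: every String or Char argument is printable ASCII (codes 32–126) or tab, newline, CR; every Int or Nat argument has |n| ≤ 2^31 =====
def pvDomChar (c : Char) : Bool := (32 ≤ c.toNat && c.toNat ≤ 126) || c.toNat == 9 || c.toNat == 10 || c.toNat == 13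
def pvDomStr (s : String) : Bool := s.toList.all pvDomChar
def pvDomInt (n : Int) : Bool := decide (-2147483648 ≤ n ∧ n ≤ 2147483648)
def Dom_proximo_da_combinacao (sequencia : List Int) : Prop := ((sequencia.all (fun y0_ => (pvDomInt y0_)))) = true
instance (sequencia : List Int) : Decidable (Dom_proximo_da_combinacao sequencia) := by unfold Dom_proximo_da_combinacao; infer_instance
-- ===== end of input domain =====

-- B replaces A's recursive descent with slice copies by one iterative scan for the first
-- index equal to the last element plus a single slice assignment (idiomatic, O(n)).
-- Both Pythons mutate `sequencia` in place identically; the equivalence is about the return value.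

-- ===== PORT A =====
-- A: if first == last, bump first (unless 6) and set the rest to 1; else recurse on the tail.
def proximo_da_combinacao (sequencia : List Int) : List Int :=
  match sequencia with
  | [] => []   -- Python raises IndexError here; excluded by Pre_
  | a :: rest =>
    if a = (a :: rest).getLast (List.cons_ne_nil a rest) then
      if a ≠ 6 then (a + 1) :: rest.map (fun _ => 1) else a :: rest
    else
      a :: proximo_da_combinacao rest

-- ===== PORT B =====
-- the `while sequencia[k] != last: k += 1` scan of Source B
def pvScanB (last : Int) : List Int → Nat
  | [] => 0
  | x :: xs => if x = last then 0 else pvScanB last xs + 1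

def proximo_da_combinacao_alt (sequencia : List Int) : List Int :=
  match sequencia.getLast? with
  | none => []   -- Python raises IndexError here; excluded by Pre_
  | some last =>
    let k := pvScanB last sequencia
    if sequencia.getD k 0 ≠ 6 then
      sequencia.take k ++ [sequencia.getD k 0 + 1] ++ List.replicate (sequencia.length - k - 1) 1
    else sequencia

-- ===== PRECONDITION & SPEC =====
-- Pre_ excludes only the empty list, on which both Pythons raise IndexError.
def Pre_proximo_da_combinacao (sequencia : List Int) : Prop := sequencia ≠ []
instance (sequencia : List Int) : Decidable (Pre_proximo_da_combinacao sequencia) := by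
  unfold Pre_proximo_da_combinacao; infer_instance
def pvWitness_proximo_da_combinacao : List Int := [2, 3, 3]

def Spec_proximo_da_combinacao (sequencia : List Int) (out : List Int) : Prop := out = proximo_da_combinacao_alt sequencia
instance (sequencia : List Int) (out : List Int) : Decidable (Spec_proximo_da_combinacao sequencia out) := by unfold Spec_proximo_da_combinacao; infer_instance

-- ===== CLAIM (what is proved, stated in full; the proofs are below) =====
def Claim_equal_proximo_da_combinacao : Prop := ∀ (sequencia : List Int), Dom_proximo_da_combinacao sequencia → Pre_proximo_da_combinacao sequencia → Spec_proximo_da_combinacao sequencia (proximo_da_combinacao sequencia)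

-- ===== LEMMAS AND PROOFS =====

theorem pv_main : ∀ (s : List Int), s ≠ [] →
    proximo_da_combinacao s = proximo_da_combinacao_alt s := by
  intro s
  induction s with
  | nil => intro h; exact absurd rfl h
  | cons a rest ih =>
    intro _
    match rest, ih with
    | [], _ =>
      simp [proximo_da_combinacao, proximo_da_combinacao_alt, pvScanB]
    | b :: t, ih =>
      have hlast : (a :: b :: t).getLast (List.cons_ne_nil a (b :: t))
          = (b :: t).getLast (List.cons_ne_nil b t) := by
        simp [List.getLast_cons]
      have hlast? : (a :: b :: t).getLast? = some ((b :: t).getLast (List.cons_ne_nil b t)) := by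
        rw [List.getLast?_cons_cons, List.getLast?_eq_some_getLast (List.cons_ne_nil b t)]
      set L := (b :: t).getLast (List.cons_ne_nil b t) with hL
      by_cases hal : a = L
      · -- head equals last: A takes the first branch, B's scan stops at 0
        have hk : pvScanB L (a :: b :: t) = 0 := by simp [pvScanB, hal]
        simp only [proximo_da_combinacao, proximo_da_combinacao_alt, hlast, hlast?, hk,
          if_pos hal]
        by_cases h6 : a = 6
        · simp [h6]
        · simp [h6, List.map_const', List.replicate_succ]
      · -- head differs from last: A recurses; B's scan and slices shift by one
        have hrec := ih (List.cons_ne_nil b t)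
        have hscan : pvScanB L (a :: b :: t) = pvScanB L (b :: t) + 1 := by
          simp [pvScanB, hal]
        have hA : proximo_da_combinacao (a :: b :: t)
            = if a = (a :: b :: t).getLast (List.cons_ne_nil a (b :: t)) then
                (if a ≠ 6 then (a + 1) :: (b :: t).map (fun _ => 1) else a :: b :: t)
              else a :: proximo_da_combinacao (b :: t) := rfl
        rw [hA, hlast, if_neg hal, hrec]
        simp only [proximo_da_combinacao_alt, hlast?,
          List.getLast?_eq_some_getLast (List.cons_ne_nil b t), ← hL, hscan,
          List.getD_cons_succ, List.take_succ_cons, List.length_cons]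
        have harith : t.length + 1 + 1 - (pvScanB L (b :: t) + 1) - 1
            = t.length + 1 - pvScanB L (b :: t) - 1 := by omega
        rw [harith]
        split_ifs <;> simp

-- ===== VERDICT (by name: the statement is the Claim_ definition above) =====
theorem proximo_da_combinacao_spec : Claim_equal_proximo_da_combinacao := by
  intro s _ hpre
  exact pv_main s hpre
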